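-- pv_equiv track=rewrite | github.com/HassanSalah120/Best-Practices-Doctor | backend/rules/laravel/contract_suggestion.py | _build_fqcn_by_basename
-- ===== SOURCE A (Python) =====
-- def _build_fqcn_by_basename(classes_by_fqcn: dict[str, object]) -> dict[str, str]:
--     out: dict[str, str] = {}
--     ambiguous: set[str] = set()
--     for fqcn in classes_by_fqcn.keys():
--         base = fqcn.split("\\")[-1]
--         if base in ambiguous:
--             continue
--         if base in out:
--             out.pop(base, None)
--             ambiguous.add(base)
--             continue
--         out[base] = fqcn
--     return out
-- ===== SOURCE B (Python) =====
-- def _build_fqcn_by_basename(classes_by_fqcn):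
--     counts: dict[str, int] = {}
--     for fqcn in classes_by_fqcn:
--         base = fqcn.split("\\")[-1]
--         counts[base] = counts.get(base, 0) + 1
--     return {fqcn.split("\\")[-1]: fqcn
--             for fqcn in classes_by_fqcn
--             if counts[fqcn.split("\\")[-1]] == 1}
-- ===== Notes on version B (the rewrite author's own statement) =====
-- stated objective: simpler
-- what changed: Replaces the single-pass insert-then-pop dict plus an ambiguous-set with two passes: first count every basename, then keep exactly the keys whose basename occurs once.
import Mathlib
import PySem

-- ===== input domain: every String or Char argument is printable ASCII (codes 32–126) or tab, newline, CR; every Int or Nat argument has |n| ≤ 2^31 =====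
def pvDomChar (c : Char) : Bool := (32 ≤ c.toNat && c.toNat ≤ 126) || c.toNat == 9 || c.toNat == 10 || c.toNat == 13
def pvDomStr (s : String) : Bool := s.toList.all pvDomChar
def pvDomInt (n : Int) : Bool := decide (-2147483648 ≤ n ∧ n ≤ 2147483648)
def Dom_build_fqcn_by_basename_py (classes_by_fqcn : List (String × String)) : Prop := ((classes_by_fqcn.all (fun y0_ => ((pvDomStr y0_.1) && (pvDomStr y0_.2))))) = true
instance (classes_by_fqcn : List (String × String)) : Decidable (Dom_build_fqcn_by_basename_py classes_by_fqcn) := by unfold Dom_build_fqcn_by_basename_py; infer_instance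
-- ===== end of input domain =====

-- B replaces A's single-pass dict-with-ambiguous-set by count-first/filter-second: same results, simpler control flow.


-- ===== PORT A =====
-- base = fqcn.split("\\")[-1]; the separator is nonempty so split? is always `some` and the piece
-- list is nonempty so the [-1] index is always in range (the defaults are unreachable)
def pvBaseName (fqcn : String) : String :=
  PySem.List.pyGetD ((PySem.Str.split? fqcn "\\").getD []) (-1) ""

-- the Python parameter is a dict: iterating `.keys()` visits the distinct keys in first-insertion order
def build_fqcn_by_basename_py (classes_by_fqcn : List (String × String)) : List (String × String) :=
  let st := (PySem.List.dedup (classes_by_fqcn.map Prod.fst)).foldl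
    (fun (st : PySem.Dict String String × PySem.Set String) fqcn =>
      let base := pvBaseName fqcn
      if PySem.Set.contains st.2 base then st
      else if st.1.contains base then (st.1.erase base, PySem.Set.add st.2 base)
      else (st.1.insert base fqcn, st.2))
    (PySem.Dict.empty, PySem.Set.empty)
  st.1.items

-- ===== PORT B =====
-- counts[base] in Source B never raises: every base was counted in the first pass, so getD is exact here
def build_fqcn_by_basename_py_alt (classes_by_fqcn : List (String × String)) : List (String × String) :=
  let keys := PySem.List.dedup (classes_by_fqcn.map Prod.fst)
  let counts := keys.foldl (fun (d : PySem.Dict String Int) fqcn =>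
      d.insert (pvBaseName fqcn) (d.getD (pvBaseName fqcn) 0 + 1)) PySem.Dict.empty
  (keys.foldl (fun (d : PySem.Dict String String) fqcn =>
      if counts.getD (pvBaseName fqcn) 0 == 1 then d.insert (pvBaseName fqcn) fqcn else d)
    PySem.Dict.empty).items


-- ===== PRECONDITION & SPEC =====
def Spec_build_fqcn_by_basename_py (classes_by_fqcn : List (String × String)) (out : List (String × String)) : Prop := out = build_fqcn_by_basename_py_alt classes_by_fqcn
instance (classes_by_fqcn : List (String × String)) (out : List (String × String)) : Decidable (Spec_build_fqcn_by_basename_py classes_by_fqcn out) := by unfold Spec_build_fqcn_by_basename_py; infer_instance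

-- ===== CLAIM (what is proved, stated in full; the proofs are below) =====
def Claim_equal_build_fqcn_by_basename_py : Prop := ∀ (classes_by_fqcn : List (String × String)), Dom_build_fqcn_by_basename_py classes_by_fqcn → Spec_build_fqcn_by_basename_py classes_by_fqcn (build_fqcn_by_basename_py classes_by_fqcn)

-- ===== LEMMAS AND PROOFS =====

lemma pv_contains_of_mem_items (d : PySem.Dict String String) (p : String × String)
    (hp : p ∈ d.items) : d.contains p.1 = true := by
  simp only [PySem.Dict.contains, List.any_eq_true]
  exact ⟨p, hp, by simp⟩

lemma pv_set_contains_iff (s : PySem.Set String) (x : String) :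
    PySem.Set.contains s x = true ↔ x ∈ s := List.contains_iff_mem

lemma pv_contains_erase (d : PySem.Dict String String) (k x : String) :
    (d.erase k).contains x = if x = k then false else d.contains x := by
  simp only [PySem.Dict.erase, PySem.Dict.contains, List.any_filter]
  by_cases hx : x = k
  · subst hx
    simp
  · simp only [if_neg hx]
    have : (fun p : String × String => (!(p.1 == k)) && (p.1 == x)) = (fun p => p.1 == x) := by
      funext p
      by_cases h : p.1 = x <;> simp [h, hx]
    rw [this]

lemma pvRunA (f : String → String) (ks : List String) (out : PySem.Dict String String)
    (amb : PySem.Set String) (c : String → Nat)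
    (hamb : ∀ b, PySem.Set.contains amb b = true ↔ 2 ≤ c b)
    (hout : ∀ b, out.contains b = true ↔ c b = 1) :
    (ks.foldl (fun (st : PySem.Dict String String × PySem.Set String) k =>
        if PySem.Set.contains st.2 (f k) then st
        else if st.1.contains (f k) then (st.1.erase (f k), PySem.Set.add st.2 (f k))
        else (st.1.insert (f k) k, st.2)) (out, amb)).1.items
      = out.items.filter (fun p => (ks.map f).count p.1 == 0)
        ++ (ks.filter (fun k => c (f k) == 0 && (ks.map f).count (f k) == 1)).map (fun k => (f k, k)) := by
  induction ks generalizing out amb c with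
  | nil => simp
  | cons k ks ih =>
    have hnokey : ∀ (hb : out.contains (f k) = false), ∀ p ∈ out.items, p.1 ≠ f k := by
      intro hb p hp hh
      have := pv_contains_of_mem_items out p hp
      rw [hh, hb] at this
      exact absurd this (by simp)
    by_cases h1 : c (f k) = 1
    · -- second occurrence of this basename: pop it and mark ambiguous
      have ha : PySem.Set.contains amb (f k) = false := by
        rw [Bool.eq_false_iff]; intro hh; have := (hamb (f k)).mp hh; omega
      have hb : out.contains (f k) = true := (hout (f k)).mpr h1
      simp only [List.foldl_cons, ha, hb, Bool.false_eq_true, if_false, if_true]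
      have hamb' : ∀ x, PySem.Set.contains (PySem.Set.add amb (f k)) x = true ↔
          2 ≤ (if x = f k then c x + 1 else c x) := by
        intro x
        rw [pv_set_contains_iff, PySem.Set.mem_add]
        by_cases hx : x = f k
        · subst hx; rw [if_pos rfl]
          exact ⟨fun _ => by omega, fun _ => Or.inr rfl⟩
        · rw [if_neg hx]
          simp only [hx, or_false]
          rw [← pv_set_contains_iff]
          exact hamb x
      have hout' : ∀ x, (out.erase (f k)).contains x = true ↔
          (if x = f k then c x + 1 else c x) = 1 := by
        intro x
        rw [pv_contains_erase]
        by_cases hx : x = f k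
        · subst hx; rw [if_pos rfl, if_pos rfl]
          exact ⟨fun hh => absurd hh (by simp), fun hh => False.elim (by omega)⟩
        · rw [if_neg hx, if_neg hx]; exact hout x
      rw [ih (out.erase (f k)) (PySem.Set.add amb (f k)) _ hamb' hout']
      simp only [PySem.Dict.erase, List.filter_filter]
      congr 1
      · apply List.filter_congr
        intro p _
        by_cases hp : p.1 = f k
        · simp [hp]
        · simp [hp, Ne.symm hp]
      · rw [List.map_cons, List.filter_cons]
        rw [if_neg (by simp [h1])]
        apply congrArg
        apply List.filter_congr
        intro x _
        by_cases hfx : f x = f k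
        · rw [hfx]; simp [h1]
        · simp [hfx, Ne.symm hfx]
    · by_cases h2 : 2 ≤ c (f k)
      · -- basename already ambiguous: skip
        have ha : PySem.Set.contains amb (f k) = true := (hamb (f k)).mpr h2
        have hb : out.contains (f k) = false := by
          rw [Bool.eq_false_iff]; intro hh; have := (hout (f k)).mp hh; omega
        simp only [List.foldl_cons, ha, if_true]
        have hamb' : ∀ x, PySem.Set.contains amb x = true ↔
            2 ≤ (if x = f k then c x + 1 else c x) := by
          intro x
          by_cases hx : x = f k
          · subst hx; rw [if_pos rfl]
            exact ⟨fun _ => by omega, fun _ => ha⟩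
          · rw [if_neg hx]; exact hamb x
        have hout' : ∀ x, out.contains x = true ↔ (if x = f k then c x + 1 else c x) = 1 := by
          intro x
          by_cases hx : x = f k
          · subst hx; rw [if_pos rfl]
            exact ⟨fun hh => absurd hh (by rw [hb]; exact Bool.false_ne_true), fun hh => False.elim (by omega)⟩
          · rw [if_neg hx]; exact hout x
        rw [ih out amb _ hamb' hout']
        congr 1
        · apply List.filter_congr
          intro p hp
          have hpk : p.1 ≠ f k := hnokey hb p hp
          simp [List.map_cons, Ne.symm hpk]
        · rw [List.map_cons, List.filter_cons]
          rw [if_neg (by simp; omega)]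
          apply congrArg
          apply List.filter_congr
          intro x _
          by_cases hfx : f x = f k
          · rw [hfx]; simp; omega
          · simp [hfx, Ne.symm hfx]
      · -- first occurrence of this basename: insert it
        have h0 : c (f k) = 0 := by omega
        have ha : PySem.Set.contains amb (f k) = false := by
          rw [Bool.eq_false_iff]; intro hh; have := (hamb (f k)).mp hh; omega
        have hb : out.contains (f k) = false := by
          rw [Bool.eq_false_iff]; intro hh; have := (hout (f k)).mp hh; omega
        simp only [List.foldl_cons, ha, hb, Bool.false_eq_true, if_false]
        have hamb' : ∀ x, PySem.Set.contains amb x = true ↔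
            2 ≤ (if x = f k then c x + 1 else c x) := by
          intro x
          by_cases hx : x = f k
          · subst hx; rw [if_pos rfl]
            exact ⟨fun hh => absurd hh (by rw [ha]; exact Bool.false_ne_true), fun hh => False.elim (by omega)⟩
          · rw [if_neg hx]; exact hamb x
        have hout' : ∀ x, (out.insert (f k) k).contains x = true ↔
            (if x = f k then c x + 1 else c x) = 1 := by
          intro x
          rw [PySem.Dict.contains_insert]
          by_cases hx : x = f k
          · subst hx; rw [if_pos rfl]
            exact ⟨fun _ => by omega, fun _ => by rw [beq_self_eq_true, Bool.true_or]⟩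
          · rw [if_neg hx, beq_false_of_ne hx, Bool.false_or]
            exact hout x
        rw [ih (out.insert (f k) k) amb _ hamb' hout']
        rw [PySem.Dict.items_insert_of_not_contains out k hb]
        rw [List.filter_append, List.map_cons, List.filter_cons]
        have hout_eq : out.items.filter (fun p => ((f k :: ks.map f).count p.1 == 0)) =
            out.items.filter (fun p => ((ks.map f).count p.1 == 0)) := by
          apply List.filter_congr
          intro p hp
          have hpk : p.1 ≠ f k := hnokey hb p hp
          simp [Ne.symm hpk]
        by_cases hcb : (ks.map f).count (f k) = 0
        · rw [if_pos (by simp [hcb])]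
          simp only [List.filter_cons]
          rw [if_pos (by simp [hcb]; omega)]
          rw [List.filter_nil, hout_eq]
          simp only [List.map_cons, List.append_assoc, List.singleton_append]
          congr 2
          refine congrArg (List.map _) ?_
          apply List.filter_congr
          intro x hx
          by_cases hfx : f x = f k
          · exfalso
            have hmem : f x ∈ ks.map f := List.mem_map_of_mem hx
            rw [hfx] at hmem
            have := List.count_pos_iff.mpr hmem
            omega
          · simp [hfx, Ne.symm hfx]
        · rw [if_neg (by simp; omega)]
          simp only [List.filter_cons]
          rw [if_neg (by simp [hcb])]
          rw [List.filter_nil, List.append_nil, hout_eq]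
          congr 1
          refine congrArg (List.map _) ?_
          apply List.filter_congr
          intro x _
          by_cases hfx : f x = f k
          · rw [hfx]; simp [h0]; omega
          · simp [hfx, Ne.symm hfx]

lemma pv_nodup_once (L : List String) : (L.filter (fun b => L.count b == 1)).Nodup := by
  rw [List.nodup_iff_count_le_one]
  intro a
  by_cases h : a ∈ L.filter (fun b => L.count b == 1)
  · have h1 := List.of_mem_filter h
    have h2 : (L.filter (fun b => L.count b == 1)).count a ≤ L.count a :=
      List.Sublist.count_le a (List.filter_sublist (l := L))
    simp at h1; omega
  · simp [List.count_eq_zero_of_not_mem h]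

lemma pv_natCast_beq_one (n : Nat) : (((n : Int)) == (1 : Int)) = (n == 1) := by
  by_cases h : n = 1 <;> simp [h]

lemma pvRunB (cbf : List (String × String)) :
    build_fqcn_by_basename_py_alt cbf
      = ((PySem.List.dedup (cbf.map Prod.fst)).filter
          (fun k => (((PySem.List.dedup (cbf.map Prod.fst)).map pvBaseName).count (pvBaseName k) == 1))).map
          (fun k => (pvBaseName k, k)) := by
  unfold build_fqcn_by_basename_py_alt
  set keys := PySem.List.dedup (cbf.map Prod.fst) with hkeys
  set L := keys.map pvBaseName with hL
  have hcounts : (keys.foldl (fun (d : PySem.Dict String Int) fqcn =>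
      d.insert (pvBaseName fqcn) (d.getD (pvBaseName fqcn) 0 + 1)) PySem.Dict.empty)
      = L.foldl (fun d x => d.insert x (d.getD x 0 + 1)) PySem.Dict.empty := by
    rw [hL, List.foldl_map]
  simp only [hcounts]
  have hgetD : ∀ b, (L.foldl (fun (d : PySem.Dict String Int) x => d.insert x (d.getD x 0 + 1))
      PySem.Dict.empty).getD b 0 = (L.count b : Int) := by
    intro b
    rw [PySem.Dict.getD_foldl_insert_add_one]
    simp
  have hcond : (fun (d : PySem.Dict String String) fqcn =>
        if (L.foldl (fun (d : PySem.Dict String Int) x => d.insert x (d.getD x 0 + 1))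
            PySem.Dict.empty).getD (pvBaseName fqcn) 0 == 1 then d.insert (pvBaseName fqcn) fqcn else d)
      = (fun (d : PySem.Dict String String) fqcn =>
        if (L.count (pvBaseName fqcn) == 1) then d.insert (pvBaseName fqcn) fqcn else d) := by
    funext d fqcn
    rw [hgetD, pv_natCast_beq_one]
  rw [hcond]
  rw [(List.foldl_filter (p := fun fqcn => (L.count (pvBaseName fqcn) == 1))
        (f := fun (d : PySem.Dict String String) fqcn => d.insert (pvBaseName fqcn) fqcn)
        (l := keys) (init := PySem.Dict.empty)).symm]
  rw [PySem.Dict.items_foldl_insert_fresh _ pvBaseName (fun a => a) PySem.Dict.empty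
      (by intro a _; simp [PySem.Dict.empty, PySem.Dict.contains])
      (by
        have hh : (keys.filter (fun fqcn => (L.count (pvBaseName fqcn) == 1))).map pvBaseName
            = L.filter (fun b => L.count b == 1) := by
          rw [hL, List.filter_map]; rfl
        rw [hh]
        exact pv_nodup_once L)]
  simp [PySem.Dict.empty]


-- ===== VERDICT (by name: the statement is the Claim_ definition above) =====
theorem build_fqcn_by_basename_py_spec : Claim_equal_build_fqcn_by_basename_py := by
  intro cbf _
  unfold Spec_build_fqcn_by_basename_py
  have hA : build_fqcn_by_basename_py cbf
      = ((PySem.List.dedup (cbf.map Prod.fst)).foldl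
          (fun (st : PySem.Dict String String × PySem.Set String) k =>
            if PySem.Set.contains st.2 (pvBaseName k) then st
            else if st.1.contains (pvBaseName k) then (st.1.erase (pvBaseName k), PySem.Set.add st.2 (pvBaseName k))
            else (st.1.insert (pvBaseName k) k, st.2))
          (PySem.Dict.empty, PySem.Set.empty)).1.items := rfl
  rw [hA, pvRunA pvBaseName (PySem.List.dedup (cbf.map Prod.fst)) PySem.Dict.empty PySem.Set.empty
        (fun _ => 0)
        (by intro b; simp [PySem.Set.empty, PySem.Set.contains])
        (by intro b; simp [PySem.Dict.empty, PySem.Dict.contains]),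
  pvRunB]
  simp [PySem.Dict.empty]
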